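-- pv_equiv track=rewrite | github.com/mathiasmellemstuen/AdventOfCode2023 | 03/problem_02.py | find_all_number_in_line
-- ===== SOURCE A (Python) =====
-- def find_all_number_in_line(line):
--     numbers = []
--
--     for i, character in enumerate(line):
--         if character.isdigit():
--             if(len(numbers) == 0):
--                 numbers.append([i])
--                 continue
--
--             if numbers[len(numbers) - 1] == []:
--                 numbers[len(numbers) - 1].append(i)
--                 continue
--
--             numbers[len(numbers) - 1].append(i)
--         else:
--             if(len(numbers) == 0):
--                 numbers.append([])
--                 continue
--
--             if numbers[len(numbers) - 1] != []:
--                 numbers.append([])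
--
--     # Removing empty lists that might occur
--     for l in numbers:
--         if l == []:
--             numbers.remove(l)
--
--     return numbers
-- ===== SOURCE B (Python) =====
-- def find_all_number_in_line(line):
--     result = []
--     n = len(line)
--     i = 0
--     while i < n:
--         if line[i].isdigit():
--             j = i
--             while j < n and line[j].isdigit():
--                 j += 1
--             result.append(list(range(i, j)))
--             i = j
--         else:
--             i += 1
--     return result
-- ===== Notes on version B (the rewrite author's own statement) =====
-- stated objective: simpler
-- what changed: B replaces A's sentinel-empty-list state machine plus a cleanup pass that deletes leftover empty lists with a single scan that, at each digit, extracts the whole maximal run of digit indices at once (inner while + range), so no empty placeholder groups ever exist.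
import Mathlib
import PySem

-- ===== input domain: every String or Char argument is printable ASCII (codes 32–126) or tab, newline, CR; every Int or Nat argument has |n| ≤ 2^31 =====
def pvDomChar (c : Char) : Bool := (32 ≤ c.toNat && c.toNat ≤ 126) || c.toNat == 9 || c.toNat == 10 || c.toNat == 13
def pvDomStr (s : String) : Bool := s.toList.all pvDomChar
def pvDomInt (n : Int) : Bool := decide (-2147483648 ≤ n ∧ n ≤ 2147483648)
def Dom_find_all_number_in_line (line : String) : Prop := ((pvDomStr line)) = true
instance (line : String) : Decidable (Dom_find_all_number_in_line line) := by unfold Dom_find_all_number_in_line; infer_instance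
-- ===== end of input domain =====

-- B replaces A's sentinel-empty-list state machine + cleanup pass with a single scan
-- that extracts each maximal run of digit indices at once (objective: simpler).

-- ===== PORT A =====
-- numbers[len(numbers)-1].append(i): in-place append to the last element (numbers ≠ [] at every call site)
def pvAppendLast : List (List Int) → Int → List (List Int)
  | [], _ => []
  | [g], i => [g ++ [i]]
  | g :: h :: t, i => g :: pvAppendLast (h :: t) i

-- the body of A's first for-loop
def pvStepA (numbers : List (List Int)) (p : Int × Char) : List (List Int) :=
  if PySem.Chars.isdigit p.2 then
    if PySem.List.len numbers = 0 then numbers ++ [[p.1]]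
    else if PySem.List.pyGetD numbers (PySem.List.len numbers - 1) [] = [] then
      pvAppendLast numbers p.1
    else
      pvAppendLast numbers p.1
  else
    if PySem.List.len numbers = 0 then numbers ++ [[]]
    else if PySem.List.pyGetD numbers (PySem.List.len numbers - 1) [] ≠ [] then numbers ++ [[]]
    else numbers

-- A's cleanup loop 'for l in numbers: if l == []: numbers.remove(l)' — Python's for advances an
-- internal index i over the list as it mutates; this is that index-based iteration, step for step
def pvCleanup (ns : List (List Int)) (i : Nat) : List (List Int) :=
  if h : i < ns.length then
    if he : ns[i] = [] then
      pvCleanup ((PySem.List.remove? ns []).getD ns) (i + 1)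
    else
      pvCleanup ns (i + 1)
  else ns
termination_by ns.length - i
decreasing_by
  · have hm : ([] : List Int) ∈ ns := he ▸ List.getElem_mem h
    rw [PySem.List.remove?_eq_some_erase _ _ hm]
    simp only [Option.getD_some]
    have := List.length_erase_of_mem hm
    omega
  · omega

def find_all_number_in_line (line : String) : List (List Int) :=
  pvCleanup ((PySem.List.enumerate line.toList 0).foldl pvStepA []) 0

-- ===== PORT B =====
-- the inner 'while j < n and line[j].isdigit(): j += 1' measured from position i: j - i
def pvRunLen : List Char → Nat
  | [] => 0
  | c :: t => if PySem.Chars.isdigit c then pvRunLen t + 1 else 0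

-- the outer while-loop of B: at a digit take the whole run (list(range(i, j))), else step on
def pvScanB : List Char → Int → List (List Int)
  | [], _ => []
  | c :: t, i =>
    if h : PySem.Chars.isdigit c then
      PySem.List.pyRange i (i + (pvRunLen (c :: t) : Int)) 1 ::
        pvScanB ((c :: t).drop (pvRunLen (c :: t))) (i + (pvRunLen (c :: t) : Int))
    else
      pvScanB t (i + 1)
termination_by cs _ => cs.length
decreasing_by
  · simp only [pvRunLen, if_pos h, List.length_drop, List.length_cons]
    omega
  · simp

def find_all_number_in_line_alt (line : String) : List (List Int) :=
  pvScanB line.toList 0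

-- ===== PRECONDITION & SPEC =====
def Spec_find_all_number_in_line (line : String) (out : List (List Int)) : Prop := out = find_all_number_in_line_alt line
instance (line : String) (out : List (List Int)) : Decidable (Spec_find_all_number_in_line line out) := by unfold Spec_find_all_number_in_line; infer_instance

-- ===== CLAIM (what is proved, stated in full; the proofs are below) =====
def Claim_equal_find_all_number_in_line : Prop := ∀ (line : String), Dom_find_all_number_in_line line → Spec_find_all_number_in_line line (find_all_number_in_line line)

-- ===== LEMMAS AND PROOFS =====

-- abbreviation for A's first loop run from state s over the characters cs enumerated from i
def pvLoopA (cs : List Char) (i : Int) (s : List (List Int)) : List (List Int) :=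
  (PySem.List.enumerate cs i).foldl pvStepA s

-- trailing sentinel left by A's loop when it ends in the "closed" state (s = G ++ [[]])
def pvTailC (cs : List Char) : List (List Int) :=
  match cs.getLast? with
  | none => [[]]
  | some c => if PySem.Chars.isdigit c then [] else [[]]

-- trailing sentinel left by A's loop when it ends in the "open" state (s = G ++ [r], r ≠ [])
def pvTailO (cs : List Char) : List (List Int) :=
  match cs.getLast? with
  | none => []
  | some c => if PySem.Chars.isdigit c then [] else [[]]

lemma pvAppendLast_cons (g : List Int) (l : List (List Int)) (hl : l ≠ []) (i : Int) :
    pvAppendLast (g :: l) i = g :: pvAppendLast l i := by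
  cases l with
  | nil => exact absurd rfl hl
  | cons h t => rfl

lemma pvAppendLast_append (G s : List (List Int)) (hs : s ≠ []) (i : Int) :
    pvAppendLast (G ++ s) i = G ++ pvAppendLast s i := by
  induction G with
  | nil => rfl
  | cons g G ih =>
    have hGs : G ++ s ≠ [] := by simp [hs]
    rw [List.cons_append, pvAppendLast_cons g (G ++ s) hGs, ih]
    simp

lemma pvLast_getD (xs : List (List Int)) (hx : xs ≠ []) :
    PySem.List.pyGetD xs (PySem.List.len xs - 1) [] = xs.getLast hx := by
  have hpos : 0 < xs.length := List.length_pos_iff.mpr hx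
  rw [PySem.List.len_eq,
    PySem.List.pyGetD_eq_getElem xs (i := (xs.length : Int) - 1) [] (by omega) (by omega),
    List.getLast_eq_getElem]
  congr 1
  omega

lemma pvStepA_ne_nil (s : List (List Int)) (p : Int × Char) : pvStepA s p ≠ [] := by
  unfold pvStepA
  cases s with
  | nil => split <;> simp
  | cons g t =>
    split
    · split
      · simp
      · split <;> (cases t <;> simp [pvAppendLast])
    · split
      · simp
      · split <;> simp

lemma pvStepA_append (G s : List (List Int)) (hs : s ≠ []) (p : Int × Char) :
    pvStepA (G ++ s) p = G ++ pvStepA s p := by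
  have hGs : G ++ s ≠ [] := by simp [hs]
  have hsl : 0 < s.length := List.length_pos_iff.mpr hs
  have hlenGs : ¬ PySem.List.len (G ++ s) = 0 := by
    simp only [PySem.List.len_eq, List.length_append]
    omega
  have hlens : ¬ PySem.List.len s = 0 := by
    simp only [PySem.List.len_eq]
    omega
  have hlast : PySem.List.pyGetD (G ++ s) (PySem.List.len (G ++ s) - 1) [] =
      PySem.List.pyGetD s (PySem.List.len s - 1) [] := by
    rw [pvLast_getD _ hGs, pvLast_getD _ hs, List.getLast_append_of_right_ne_nil _ _ hs]
  unfold pvStepA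
  rw [hlast]
  simp only [if_neg hlenGs, if_neg hlens, ite_self]
  split
  · rw [pvAppendLast_append _ _ hs]
  · split <;> simp

lemma pvLoopA_append (cs : List Char) (i : Int) (G s : List (List Int)) (hs : s ≠ []) :
    pvLoopA cs i (G ++ s) = G ++ pvLoopA cs i s := by
  induction cs generalizing i s with
  | nil => simp [pvLoopA, PySem.List.enumerate_nil]
  | cons c t ih =>
    unfold pvLoopA
    rw [PySem.List.enumerate_cons, List.foldl_cons, List.foldl_cons,
      pvStepA_append _ _ hs]
    exact ih (i + 1) _ (pvStepA_ne_nil s (i, c))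

-- one step of A's loop from the two reachable abstract states
lemma pvStepA_closed (i : Int) (c : Char) :
    pvStepA [[]] (i, c) = if PySem.Chars.isdigit c then [[i]] else [[]] := by
  unfold pvStepA pvAppendLast
  simp [PySem.List.len_eq]

lemma pvStepA_open (r : List Int) (hr : r ≠ []) (i : Int) (c : Char) :
    pvStepA [r] (i, c) = if PySem.Chars.isdigit c then [r ++ [i]] else [r, []] := by
  unfold pvStepA pvAppendLast
  have hg : PySem.List.pyGetD [r] (PySem.List.len [r] - 1) [] = r := by
    rw [pvLast_getD [r] (by simp)]
    rfl
  simp [PySem.List.len_eq, hr]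

lemma pvTailO_cons_cons (c d : Char) (u : List Char) :
    pvTailO (c :: d :: u) = pvTailO (d :: u) := by
  unfold pvTailO
  rw [List.getLast?_cons_cons]

lemma pvTailC_cons_cons (c d : Char) (u : List Char) :
    pvTailC (c :: d :: u) = pvTailC (d :: u) := by
  unfold pvTailC
  rw [List.getLast?_cons_cons]

lemma pvTailO_eq_pvTailC (cs : List Char) (h : cs ≠ []) : pvTailO cs = pvTailC cs := by
  cases cs with
  | nil => exact absurd rfl h
  | cons c t => unfold pvTailO pvTailC; rfl

lemma pvTailC_cases (cs : List Char) : pvTailC cs = [] ∨ pvTailC cs = [[]] := by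
  unfold pvTailC
  cases cs.getLast? with
  | none => exact Or.inr rfl
  | some c =>
    by_cases hc : PySem.Chars.isdigit c = true
    · exact Or.inl (by simp [hc])
    · exact Or.inr (by simp [hc])

lemma pvRange_empty (i : Int) : PySem.List.pyRange i i 1 = [] := by
  rw [List.eq_nil_iff_forall_not_mem]
  intro x hx
  have := PySem.List.mem_pyRange_one.mp hx
  omega

-- the main invariant: A's loop from the closed state [[]] computes B's groups plus a
-- possible trailing sentinel, and from an open state [r] it first finishes r's run
lemma pvLoopA_PQ (cs : List Char) :
    (∀ i : Int, pvLoopA cs i [[]] = pvScanB cs i ++ pvTailC cs) ∧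
    (∀ (i : Int) (r : List Int), r ≠ [] →
      pvLoopA cs i [r] =
        ((r ++ PySem.List.pyRange i (i + (pvRunLen cs : Int)) 1) ::
          pvScanB (cs.drop (pvRunLen cs)) (i + (pvRunLen cs : Int))) ++ pvTailO cs) := by
  induction cs with
  | nil =>
    constructor
    · intro i
      simp [pvLoopA, PySem.List.enumerate_nil, pvScanB, pvTailC]
    · intro i r hr
      simp [pvLoopA, PySem.List.enumerate_nil, pvScanB, pvRunLen, pvTailO]
  | cons c t ih =>
    obtain ⟨ihP, ihQ⟩ := ih
    have hstep : ∀ (i : Int) (s : List (List Int)),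
        pvLoopA (c :: t) i s = pvLoopA t (i + 1) (pvStepA s (i, c)) := by
      intro i s
      unfold pvLoopA
      rw [PySem.List.enumerate_cons, List.foldl_cons]
    by_cases hc : PySem.Chars.isdigit c = true
    · -- c is a digit
      have hrun : pvRunLen (c :: t) = pvRunLen t + 1 := by
        simp [pvRunLen, hc]
      have hdrop : (c :: t).drop (pvRunLen (c :: t)) = t.drop (pvRunLen t) := by
        rw [hrun]; rfl
      have hscan : ∀ i : Int, pvScanB (c :: t) i =
          PySem.List.pyRange i (i + (pvRunLen (c :: t) : Int)) 1 ::
            pvScanB ((c :: t).drop (pvRunLen (c :: t))) (i + (pvRunLen (c :: t) : Int)) := by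
        intro i
        rw [pvScanB]
        simp [hc]
      have hidx : ∀ i : Int, i + (pvRunLen (c :: t) : Int) = (i + 1) + (pvRunLen t : Int) := by
        intro i; rw [hrun]; push_cast; ring
      have htails : ∀ tail : List Char → List (List Int),
          (tail = pvTailO ∨ tail = pvTailC) → tail (c :: t) = pvTailO t := by
        rintro tail (rfl | rfl) <;>
          (cases t with
           | nil => simp [pvTailO, pvTailC, hc]
           | cons d u =>
             first
             | rw [pvTailO_cons_cons]
             | (rw [pvTailC_cons_cons]; exact (pvTailO_eq_pvTailC _ (by simp)).symm))
      constructor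
      · intro i
        rw [hstep, pvStepA_closed, if_pos hc, ihQ (i + 1) [i] (by simp)]
        rw [hscan, hdrop, hidx, htails pvTailC (Or.inr rfl)]
        rw [PySem.List.pyRange_one_cons (show i < (i + 1) + (pvRunLen t : Int) by omega)]
        simp
      · intro i r hr
        rw [hstep, pvStepA_open r hr, if_pos hc, ihQ (i + 1) (r ++ [i]) (by simp)]
        rw [hdrop, hidx, htails pvTailO (Or.inl rfl)]
        rw [PySem.List.pyRange_one_cons (show i < (i + 1) + (pvRunLen t : Int) by omega)]
        simp
    · -- c is not a digit
      have hrun : pvRunLen (c :: t) = 0 := by simp [pvRunLen, hc]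
      have hscan : ∀ i : Int, pvScanB (c :: t) i = pvScanB t (i + 1) := by
        intro i
        rw [pvScanB]
        simp [hc]
      have htailsC : pvTailC (c :: t) = pvTailC t := by
        cases t with
        | nil => simp [pvTailC, hc]
        | cons d u => rw [pvTailC_cons_cons]
      have htailsO : pvTailO (c :: t) = pvTailC t := by
        cases t with
        | nil => simp [pvTailO, pvTailC, hc]
        | cons d u =>
          rw [pvTailO_cons_cons]
          exact pvTailO_eq_pvTailC _ (by simp)
      constructor
      · intro i
        rw [hstep, pvStepA_closed, if_neg hc, ihP (i + 1), hscan, htailsC]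
      · intro i r hr
        rw [hstep, pvStepA_open r hr, if_neg hc]
        have hsplit : ([r, ([] : List Int)] : List (List Int)) = [r] ++ [[]] := rfl
        rw [hsplit, pvLoopA_append _ _ _ _ (by simp), ihP (i + 1)]
        rw [hrun]
        simp only [Nat.cast_zero, add_zero, List.drop_zero, hscan i, htailsO,
          pvRange_empty, List.append_nil]
        simp

-- every group B produces is a nonempty run
lemma pvScanB_ne_nil : ∀ (n : Nat) (cs : List Char), cs.length ≤ n → ∀ (i : Int) (g : List Int),
    g ∈ pvScanB cs i → g ≠ [] := by
  intro n
  induction n with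
  | zero =>
    intro cs hn i g hg
    have : cs = [] := List.length_eq_zero_iff.mp (by omega)
    subst this
    simp [pvScanB] at hg
  | succ n ih =>
    intro cs hn i g hg
    cases cs with
    | nil => simp [pvScanB] at hg
    | cons c t =>
      rw [pvScanB] at hg
      by_cases hc : PySem.Chars.isdigit c = true
      · have hrun : pvRunLen (c :: t) = pvRunLen t + 1 := by simp [pvRunLen, hc]
        simp only [hc, dite_true] at hg
        rcases List.mem_cons.mp hg with h | h
        · rw [h, hrun, PySem.List.pyRange_one_cons (by push_cast; omega)]
          simp
        · refine ih _ ?_ _ _ h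
          simp only [hrun, List.drop_succ_cons, List.length_drop]
          simp at hn
          omega
      · simp only [hc] at hg
        refine ih t ?_ _ _ hg
        simp at hn
        omega

-- the cleanup pass is the identity on a list without empty members
lemma pvCleanup_id : ∀ (k : Nat) (ns : List (List Int)) (i : Nat),
    ns.length - i ≤ k → [] ∉ ns → pvCleanup ns i = ns := by
  intro k
  induction k with
  | zero =>
    intro ns i hk _
    rw [pvCleanup, dif_neg (by omega)]
  | succ k ih =>
    intro ns i hk hmem
    rw [pvCleanup]
    by_cases hi : i < ns.length
    · rw [dif_pos hi, dif_neg (by intro he; exact hmem (he ▸ List.getElem_mem hi))]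
      exact ih ns (i + 1) (by omega) hmem
    · rw [dif_neg hi]

-- one step of the cleanup pass at the trailing sentinel: it is removed and the pass ends
lemma pvCleanup_last (X : List (List Int)) (i : Nat) (hieq : i = X.length)
    (hmem : [] ∉ X) : pvCleanup (X ++ [[]]) i = X := by
  subst hieq
  have hx : (X ++ [[]])[X.length]'(by simp) = ([] : List Int) := by
    rw [List.getElem_append_right (le_refl X.length)]
    simp
  rw [pvCleanup, dif_pos (by simp), dif_pos hx,
    PySem.List.remove?_eq_some_erase _ _ (by simp), Option.getD_some,
    List.erase_append_right _ hmem]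
  simp only [List.erase_cons_head, List.append_nil]
  rw [pvCleanup, dif_neg (by omega)]

-- the cleanup pass removes the single trailing empty sentinel
lemma pvCleanup_trailing : ∀ (k : Nat) (X : List (List Int)) (i : Nat),
    X.length - i ≤ k → i ≤ X.length → [] ∉ X → pvCleanup (X ++ [[]]) i = X := by
  intro k
  induction k with
  | zero =>
    intro X i hk hi hmem
    exact pvCleanup_last X i (by omega) hmem
  | succ k ih =>
    intro X i hk hi hmem
    rcases Nat.lt_or_ge i X.length with hlt | hge
    · rw [pvCleanup, dif_pos (by simp; omega), dif_neg]
      · exact ih X (i + 1) (by omega) (by omega) hmem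
      · rw [List.getElem_append_left hlt]
        exact fun h => hmem (h ▸ List.getElem_mem hlt)
    · exact pvCleanup_last X i (by omega) hmem

lemma pvStepA_nil_eq (p : Int × Char) : pvStepA [] p = pvStepA [[]] p := by
  unfold pvStepA pvAppendLast
  simp [PySem.List.len_eq]

-- ===== VERDICT (by name: the statement is the Claim_ definition above) =====
theorem find_all_number_in_line_spec : Claim_equal_find_all_number_in_line := by
  intro line _
  unfold Spec_find_all_number_in_line find_all_number_in_line find_all_number_in_line_alt
  cases hl : line.toList with
  | nil =>
    simp only [PySem.List.enumerate_nil, List.foldl_nil]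
    rw [pvCleanup, dif_neg (by simp)]
    rw [pvScanB]
  | cons c t =>
    have h1 : (PySem.List.enumerate (c :: t) 0).foldl pvStepA [] =
        pvLoopA (c :: t) 0 [[]] := by
      unfold pvLoopA
      rw [PySem.List.enumerate_cons, List.foldl_cons, List.foldl_cons, pvStepA_nil_eq]
    rw [h1, (pvLoopA_PQ (c :: t)).1 0]
    have hne : [] ∉ pvScanB (c :: t) 0 :=
      fun h => pvScanB_ne_nil (c :: t).length (c :: t) (le_refl _) 0 [] h rfl
    rcases pvTailC_cases (c :: t) with h | h <;> rw [h]
    · rw [List.append_nil]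
      exact pvCleanup_id (pvScanB (c :: t) 0).length _ 0 (by omega) hne
    · exact pvCleanup_trailing (pvScanB (c :: t) 0).length _ 0 (by omega) (by omega) hne
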